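-- pv_equiv track=rewrite | github.com/yohan9569/Algorithm | Programmers/132265.py | solution
-- ===== SOURCE A (Python) =====
-- from collections import Counter
--
-- def solution(topping):
--     front = set(topping)
--     end = set()
--     cnt = Counter(topping)
--     ans = 0
--     for i in range(len(topping)):
--         t = topping.pop()
--         cnt[t] -= 1
--         if cnt[t] == 0:
--             front.remove(t)
--         end.add(t)
--         if len(end) == len(front):
--             ans += 1
--     return ans
-- ===== SOURCE B (Python) =====
-- def solution(topping):
--     # one backward pass: consume topping from the end, recording the distinct
--     # count of each suffix; then a forward pass with a growing prefix set.
--     rev = []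
--     seen = set()
--     suf = []  # suf[k] = number of distinct values among the last k+1 elements
--     while topping:
--         t = topping.pop()
--         rev.append(t)
--         seen.add(t)
--         suf.append(len(seen))
--     n = len(rev)
--     ans = 0
--     pre = set()
--     for j in range(n):
--         if len(pre) == suf[n - 1 - j]:
--             ans += 1
--         pre.add(rev[n - 1 - j])
--     return ans
-- ===== Notes on version B (the rewrite author's own statement) =====
-- stated objective: alternative
-- what changed: A interleaves a Counter decrement, a shrinking prefix set and a growing suffix set in one destructive loop; B first consumes the list backwards recording each suffix's distinct count, then counts matches in a separate forward pass with a growing prefix set (both consume `topping` in place; same O(n) cost).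
import Mathlib
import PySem

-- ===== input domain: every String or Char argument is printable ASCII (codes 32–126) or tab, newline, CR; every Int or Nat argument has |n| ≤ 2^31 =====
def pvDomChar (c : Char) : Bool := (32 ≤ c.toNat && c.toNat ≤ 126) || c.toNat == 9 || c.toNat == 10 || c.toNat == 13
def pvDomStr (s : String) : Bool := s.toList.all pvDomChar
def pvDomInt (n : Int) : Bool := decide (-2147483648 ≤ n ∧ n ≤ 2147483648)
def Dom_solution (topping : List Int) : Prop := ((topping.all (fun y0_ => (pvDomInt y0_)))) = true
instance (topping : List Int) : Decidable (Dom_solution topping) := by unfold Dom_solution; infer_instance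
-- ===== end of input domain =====

-- B replaces A's single destructive loop (Counter + two live sets) by a backward pass
-- recording suffix-distinct counts and a forward counting pass with a growing prefix set
-- (objective: alternative decomposition; both Pythons consume `topping` in place,
-- the equivalence proved here is about the return value).

-- ===== PORT A =====
-- for i in range(len(topping)): t = topping.pop(); cnt[t] -= 1; …
-- (fuel = initial length; `front.remove(t)` is ported as Set.discard, exact here because
-- t is always a member of `front` when its count reaches 0 — it is t's last occurrence)
def solutionLoopA : Nat → List Int → PySem.Set Int → PySem.Set Int → PySem.Dict Int Int → Int → Int
  | 0, _, _, _, _, ans => ans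
  | (i+1), lst, front, endS, cnt, ans =>
      match PySem.List.pop? lst with
      | none => ans   -- unreachable: the fuel never exceeds the list length
      | some (t, rest) =>
          let cnt' := cnt.modify t 0 (· - 1)
          let front' := if cnt'.getD t 0 == 0 then PySem.Set.discard front t else front
          let endS' := PySem.Set.add endS t
          let ans' := if PySem.Set.len endS' == PySem.Set.len front' then ans + 1 else ans
          solutionLoopA i rest front' endS' cnt' ans'

def solution (topping : List Int) : Int :=
  solutionLoopA topping.length topping (PySem.Set.ofList topping) PySem.Set.empty
    (PySem.Dict.counter topping) 0

-- ===== PORT B =====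
-- while topping: t = topping.pop(); rev.append(t); seen.add(t); suf.append(len(seen))
def solutionAltPop (lst rev : List Int) (seen : PySem.Set Int) (suf : List Int) :
    List Int × PySem.Set Int × List Int :=
  match h : PySem.List.pop? lst with
  | none => (rev, seen, suf)
  | some (t, rest) =>
      let seen' := PySem.Set.add seen t
      solutionAltPop rest (rev ++ [t]) seen' (suf ++ [PySem.Set.len seen'])
termination_by lst.length
decreasing_by
  have hl := PySem.List.length_of_pop?_eq_some lst h
  simp at hl ⊢; omega

def solution_alt (topping : List Int) : Int :=
  let r := solutionAltPop topping [] PySem.Set.empty []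
  let rev := r.1
  let suf := r.2.2
  let n := rev.length
  let st := (PySem.List.pyRange 0 n).foldl
    (fun (st : Int × PySem.Set Int) j =>
      let ans := if PySem.Set.len st.2 == PySem.List.pyGetD suf (n - 1 - j) 0
                 then st.1 + 1 else st.1
      (ans, PySem.Set.add st.2 (PySem.List.pyGetD rev (n - 1 - j) 0)))
    (0, PySem.Set.empty)
  st.1

-- ===== PRECONDITION & SPEC =====
def Spec_solution (topping : List Int) (out : Int) : Prop := out = solution_alt topping
instance (topping : List Int) (out : Int) : Decidable (Spec_solution topping out) := by unfold Spec_solution; infer_instance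

-- ===== CLAIM (what is proved, stated in full; the proofs are below) =====
def Claim_equal_solution : Prop := ∀ (topping : List Int), Dom_solution topping → Spec_solution topping (solution topping)

-- ===== LEMMAS AND PROOFS =====

-- number of distinct values in l
def dc (l : List Int) : Nat := (PySem.List.dedup l).length

-- the common specification: number of split points j (0 ≤ j < length) with
-- equally many distinct values in the prefix l.take j and the suffix l.drop j
def splitCount (l : List Int) : Nat :=
  (List.range l.length).countP (fun j => dc (l.take j) == dc (l.drop j))

lemma ofList_append_singleton {t : Int} (ys : List Int) :
    PySem.Set.ofList (ys ++ [t]) = PySem.Set.add (PySem.Set.ofList ys) t := by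
  simp [PySem.Set.ofList_eq_foldl, List.foldl_append]

lemma dedup_append_singleton (ys : List Int) (t : Int) :
    PySem.List.dedup (ys ++ [t]) = PySem.Set.add (PySem.List.dedup ys) t := by
  simp [PySem.List.dedup_eq_ofList, ofList_append_singleton]

lemma len_ofList_reverse (l : List Int) :
    (PySem.Set.ofList l.reverse).length = dc l := by
  unfold dc
  rw [PySem.List.dedup_eq_ofList]
  apply List.Perm.length_eq
  rw [List.perm_ext_iff_of_nodup (PySem.Set.nodup_ofList _) (PySem.Set.nodup_ofList _)]
  intro a
  simp [PySem.Set.mem_ofList]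

lemma discard_append_singleton {ys : List Int} {t : Int} (h : t ∉ ys) :
    PySem.Set.discard (ys ++ [t]) t = ys := by
  simp [PySem.Set.discard, List.filter_append]
  intro a ha hat
  exact absurd (hat ▸ ha) h

-- counting helper with an explicit already-consumed suffix s
def splitCount_aux (p s : List Int) : Nat :=
  (List.range p.length).countP (fun j => dc (p.take j) == dc (p.drop j ++ s))

lemma splitCount_append (p : List Int) (t : Int) (s : List Int) :
    splitCount_aux (p ++ [t]) s =
      splitCount_aux p (t :: s) + (if dc p == dc (t :: s) then 1 else 0) := by
  unfold splitCount_aux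
  have hlen : (p ++ [t]).length = p.length + 1 := by simp
  rw [hlen, List.range_succ, List.countP_append]
  congr 1
  · apply List.countP_congr
    intro j hj
    have hj' : j < p.length := List.mem_range.mp hj
    rw [List.take_append_of_le_length (by omega), List.drop_append_of_le_length (by omega)]
    simp
  · have h1 : (p ++ [t]).take p.length = p := by simp
    have h2 : (p ++ [t]).drop p.length = [t] := by simp
    simp [h1, h2, List.countP_cons]

lemma loopA_spec (p : List Int) : ∀ (s : List Int) (front endS : PySem.Set Int)
    (cnt : PySem.Dict Int Int) (ans : Int),
    front = PySem.List.dedup p →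
    endS = PySem.Set.ofList s.reverse →
    (∀ x, cnt.getD x 0 = (p.count x : Int)) →
    solutionLoopA p.length p front endS cnt ans = ans + splitCount_aux p s := by
  induction p using List.reverseRecOn with
  | nil =>
      intro s front endS cnt ans _ _ _
      simp [solutionLoopA, splitCount_aux]
  | append_singleton p' t ih =>
      intro s front endS cnt ans hf he hc
      have hlen : (p' ++ [t]).length = p'.length + 1 := by simp
      rw [hlen]
      simp only [solutionLoopA, PySem.List.pop?_last]
      have hcnt' : ∀ x, (cnt.modify t 0 (· - 1)).getD x 0 = (p'.count x : Int) := by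
        intro x
        rw [PySem.Dict.getD_modify]
        by_cases hx : x = t
        · subst hx
          rw [if_pos rfl, hc]
          simp [List.count_append]
        · rw [if_neg hx, hc, List.count_append]
          simp [List.count_eq_zero]
          exact hx
      have hfront' : (if (cnt.modify t 0 (· - 1)).getD t 0 == 0
            then PySem.Set.discard front t else front) = PySem.List.dedup p' := by
        rw [hcnt' t, hf, dedup_append_singleton]
        by_cases hm : t ∈ p'
        · have hne : ((p'.count t : Int) == 0) = false := by
            simp [List.count_eq_zero]
            exact hm
          rw [hne, if_neg (by simp)]
          simp [PySem.Set.add, PySem.Set.contains, hm]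
        · have hz : ((p'.count t : Int) == 0) = true := by
            simp [List.count_eq_zero]
            exact hm
          rw [hz, if_pos rfl]
          have htd : t ∉ PySem.List.dedup p' := by
            rw [PySem.List.mem_dedup]
            exact hm
          have hadd : PySem.Set.add (PySem.List.dedup p') t = PySem.List.dedup p' ++ [t] := by
            simp [PySem.Set.add, PySem.Set.contains, hm]
          rw [hadd, discard_append_singleton htd]
      have hend' : PySem.Set.add endS t = PySem.Set.ofList (t :: s).reverse := by
        rw [he, List.reverse_cons, ofList_append_singleton]
      rw [hfront', hend']
      have hcond : (PySem.Set.len (PySem.Set.ofList (t :: s).reverse)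
            == PySem.Set.len (PySem.List.dedup p')) = (dc (t :: s) == dc p') := by
        unfold PySem.Set.len
        rw [len_ofList_reverse]
        have : (PySem.List.dedup p').length = dc p' := rfl
        rw [this]
        simp
      rw [hcond, ih (t :: s) _ _ _ _ rfl rfl hcnt', splitCount_append]
      by_cases hdc : dc p' = dc (t :: s)
      · simp [hdc]
        omega
      · have h1 : (dc (t :: s) == dc p') = false := by
          simp
          omega
        have h2 : (dc p' == dc (t :: s)) = false := by simpa using hdc
        rw [h1, h2]
        simp

-- suffix-distinct list built by B's first loop
def sufFor : List Int → List Int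
  | [] => []
  | t :: q => sufFor q ++ [(dc (t :: q) : Int)]

lemma length_sufFor (q : List Int) : (sufFor q).length = q.length := by
  induction q with
  | nil => rfl
  | cons t q ih => simp [sufFor, ih]

lemma sufFor_getD (q : List Int) : ∀ k, k < q.length →
    (sufFor q).getD k 0 = (dc (q.drop (q.length - 1 - k)) : Nat) := by
  induction q with
  | nil => intro k hk; simp at hk
  | cons t q ih =>
      intro k hk
      rcases Nat.lt_succ_iff_lt_or_eq.mp (by simpa using hk) with h | h
      · have hlen : k < (sufFor q).length := by rw [length_sufFor]; exact h
        rw [sufFor, List.getD_append _ _ _ _ hlen, ih k h]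
        have : (t :: q).length - 1 - k = (q.length - 1 - k) + 1 := by simp; omega
        rw [this, List.drop_succ_cons]
      · subst h
        have hl : (sufFor q).length = q.length := length_sufFor q
        simp [sufFor, hl]

lemma altPop_spec (p : List Int) : ∀ (q : List Int),
    solutionAltPop p q.reverse (PySem.Set.ofList q.reverse) (sufFor q) =
      ((p ++ q).reverse, PySem.Set.ofList (p ++ q).reverse, sufFor (p ++ q)) := by
  induction p using List.reverseRecOn with
  | nil =>
      intro q
      rw [solutionAltPop]
      rfl
  | append_singleton p' t ih =>
      intro q
      rw [solutionAltPop]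
      split
      · next hnone =>
          rw [PySem.List.pop?_last] at hnone
          cases hnone
      · next t' rest hsome =>
          rw [PySem.List.pop?_last] at hsome
          simp only [Option.some_inj, Prod.mk.injEq] at hsome
          obtain ⟨ht, hrest⟩ := hsome
          subst ht; subst hrest
          have h1 : q.reverse ++ [t] = (t :: q).reverse := (List.reverse_cons ..).symm
          have h2 : PySem.Set.add (PySem.Set.ofList q.reverse) t
              = PySem.Set.ofList (t :: q).reverse := by
            rw [List.reverse_cons, ofList_append_singleton]
          have h3 : PySem.Set.len (PySem.Set.ofList (t :: q).reverse)
              = (dc (t :: q) : Int) := by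
            unfold PySem.Set.len
            rw [len_ofList_reverse]
          rw [h1, h2]
          show solutionAltPop p' (t :: q).reverse (PySem.Set.ofList (t :: q).reverse)
              (sufFor q ++ [PySem.Set.len (PySem.Set.ofList (t :: q).reverse)]) = _
          rw [h3]
          have h4 : sufFor q ++ [(dc (t :: q) : Int)] = sufFor (t :: q) := rfl
          rw [h4, ih (t :: q)]
          simp

lemma loopB_spec (full : List Int) : ∀ k, k ≤ full.length →
    (PySem.List.pyRange 0 (k : Int)).foldl
      (fun (st : Int × PySem.Set Int) j =>
        let ans := if PySem.Set.len st.2 ==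
            PySem.List.pyGetD (sufFor full) ((full.length : Int) - 1 - j) 0
          then st.1 + 1 else st.1
        (ans, PySem.Set.add st.2
          (PySem.List.pyGetD full.reverse ((full.length : Int) - 1 - j) 0)))
      (0, PySem.Set.empty)
    = (((List.range k).countP (fun j => dc (full.take j) == dc (full.drop j)) : Int),
        PySem.List.dedup (full.take k)) := by
  intro k
  induction k with
  | zero => intro _; rfl
  | succ k ih =>
      intro hk
      have hk' : k ≤ full.length := by omega
      have hcast : ((k + 1 : Nat) : Int) = (k : Int) + 1 := by push_cast; ring
      rw [hcast, PySem.List.pyRange_one_succ_right (by positivity), List.foldl_append,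
        ih hk', List.foldl_cons, List.foldl_nil]
      have hm : (full.length : Int) - 1 - (k : Int) = ((full.length - 1 - k : Nat) : Int) := by
        omega
      have hmlt : full.length - 1 - k < full.length := by omega
      have hsuf : PySem.List.pyGetD (sufFor full) ((full.length : Int) - 1 - (k : Int)) 0
          = (dc (full.drop k) : Int) := by
        rw [hm, PySem.List.pyGetD_natCast, sufFor_getD full _ hmlt]
        have he : full.length - 1 - (full.length - 1 - k) = k := by omega
        rw [he]
      have hklt : k < full.length := by omega
      have hrev : PySem.List.pyGetD full.reverse ((full.length : Int) - 1 - (k : Int)) 0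
          = full[k] := by
        rw [hm, PySem.List.pyGetD_natCast,
          List.getD_eq_getElem _ _ (by simp; omega), List.getElem_reverse]
        congr 1
        omega
      have hlen : PySem.Set.len (PySem.List.dedup (full.take k))
          = (dc (full.take k) : Int) := rfl
      simp only [hsuf, hrev, hlen]
      have hcond : ((dc (full.take k) : Int) == (dc (full.drop k) : Int))
          = (dc (full.take k) == dc (full.drop k)) := by simp
      have hpre : PySem.Set.add (PySem.List.dedup (full.take k)) full[k]
          = PySem.List.dedup (full.take (k + 1)) := by
        rw [List.take_succ_eq_append_getElem hklt, dedup_append_singleton]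
      rw [hcond, hpre]
      have hcnt : (List.range (k + 1)).countP
            (fun j => dc (full.take j) == dc (full.drop j))
          = (List.range k).countP (fun j => dc (full.take j) == dc (full.drop j))
            + (if dc (full.take k) == dc (full.drop k) then 1 else 0) := by
        rw [List.range_succ, List.countP_append]
        simp [List.countP_cons]
      rw [hcnt]
      by_cases hdc : (dc (full.take k) == dc (full.drop k)) = true
      · simp [hdc]
      · simp only [hdc]
        simp at hdc
        simp

lemma solution_eq_splitCount (l : List Int) : solution l = (splitCount l : Int) := by
  unfold solution
  have hempty : (PySem.Set.empty : PySem.Set Int) = PySem.Set.ofList ([] : List Int).reverse := rfl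
  rw [hempty, loopA_spec l [] _ _ _ 0 (PySem.List.dedup_eq_ofList l).symm rfl
    (fun x => PySem.Dict.getD_counter l x)]
  simp [splitCount_aux, splitCount, dc]

lemma solution_alt_eq_splitCount (l : List Int) : solution_alt l = (splitCount l : Int) := by
  unfold solution_alt
  have h0 : solutionAltPop l [] PySem.Set.empty []
      = (l.reverse, PySem.Set.ofList l.reverse, sufFor l) := by
    simpa using altPop_spec l []
  rw [h0]
  simp only [List.length_reverse]
  rw [loopB_spec l l.length le_rfl]
  simp [splitCount]

-- ===== VERDICT (by name: the statement is the Claim_ definition above) =====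
theorem solution_spec : Claim_equal_solution := by
  intro topping _
  unfold Spec_solution
  rw [solution_eq_splitCount, solution_alt_eq_splitCount]
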